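-- pv_equiv track=rewrite | github.com/ningziwei/MultiTaskBart | data_pipe.py | get_targ_ents_3
-- ===== SOURCE A (Python) =====
-- def get_targ_ents_3(pos_list, rotate_pos_cls, ent_end_pos):
--     '''得到序列中的实体'''
--     i, N = 0, len(pos_list)
--
--     ents = []
--     while i<N:
--         # 碰到实体开始符
--         if pos_list[i] in rotate_pos_cls[0]:
--             ent = [pos_list[i]]
--             i += 1
--             while i<N:
--                 ent.append(pos_list[i])
--                 # 碰到实体结束符
--                 if pos_list[i] == ent_end_pos:
--                     i += 1
--                     if i<N and pos_list[i] in rotate_pos_cls[1]: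
--                         ent.append(pos_list[i])
--                         i += 1
--                     break
--                 i += 1
--             ents.append(ent)
--         else:
--             i += 1
--     return ents
-- ===== SOURCE B (Python) =====
-- def get_targ_ents_3(pos_list, rotate_pos_cls, ent_end_pos):
--     '''Single-pass state machine: ent=None means OUTSIDE; expecting marks a just-closed
--     entity waiting for an optional class token.'''
--     starts, clss = rotate_pos_cls[0], rotate_pos_cls[1]
--     ents, ent, expecting = [], None, False
--     for t in pos_list:
--         if ent is None:
--             if t in starts:
--                 ent = [t]
--         elif not expecting:
--             ent.append(t)
--             expecting = (t == ent_end_pos)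
--         else:
--             if t in clss:
--                 ents.append(ent + [t])
--                 ent = None
--             elif t in starts:
--                 ents.append(ent)
--                 ent = [t]
--             else:
--                 ents.append(ent)
--                 ent = None
--             expecting = False
--     if ent is not None:
--         ents.append(ent)
--     return ents
-- ===== Notes on version B (the rewrite author's own statement) =====
-- stated objective: simpler
-- what changed: Replaces A's nested while loops with a manually advanced index by a single for-loop state machine (current entity + expecting-class flag), with the class-miss token re-examined inline instead of left unconsumed.
-- outside the precondition, e.g. on get_targ_ents_3([], [], 0): A returns [], B raises IndexError; on get_targ_ents_3([1, 2], [[1]], 5): A returns [[1, 2]], B raises IndexError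
import Mathlib
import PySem

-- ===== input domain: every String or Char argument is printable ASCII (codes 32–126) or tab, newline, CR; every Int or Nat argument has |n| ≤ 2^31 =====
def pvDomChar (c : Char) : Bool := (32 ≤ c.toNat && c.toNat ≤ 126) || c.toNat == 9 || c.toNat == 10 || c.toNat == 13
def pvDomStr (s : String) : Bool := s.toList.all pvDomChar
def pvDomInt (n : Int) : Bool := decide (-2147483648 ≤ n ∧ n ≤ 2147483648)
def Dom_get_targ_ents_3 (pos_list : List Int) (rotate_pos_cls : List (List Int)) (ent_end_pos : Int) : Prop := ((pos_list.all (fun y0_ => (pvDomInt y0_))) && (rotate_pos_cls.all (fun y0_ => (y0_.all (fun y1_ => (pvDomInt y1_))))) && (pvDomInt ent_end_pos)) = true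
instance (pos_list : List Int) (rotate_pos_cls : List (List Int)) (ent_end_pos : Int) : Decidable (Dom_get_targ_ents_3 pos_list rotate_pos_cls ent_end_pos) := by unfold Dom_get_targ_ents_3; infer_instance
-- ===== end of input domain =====

-- B replaces A's nested while loops over a mutable index with a single pass
-- (one fold with an explicit OUTSIDE/INSIDE/EXPECT-CLS state); objective: simpler.


-- ===== PORT A =====
-- A's inner `while i<N` loop: collects tokens into ent until ent_end_pos, then peeks
-- one token for the class marker; returns (finished entity, remaining suffix).
def pvAInner (C : List Int) (e : Int) : List Int → List Int → List Int × List Int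
  | [], ent => (ent, [])
  | x :: xs, ent =>
      let ent' := ent ++ [x]
      if x = e then
        match xs with
        | [] => (ent', [])
        | y :: ys => if y ∈ C then (ent' ++ [y], ys) else (ent', y :: ys)
      else pvAInner C e xs ent'

-- termination fact A's outer recursion cites: the inner loop never lengthens the suffix
theorem pvAInner_len (C : List Int) (e : Int) :
    ∀ (l ent : List Int), (pvAInner C e l ent).2.length ≤ l.length := by
  intro l
  induction l with
  | nil => intro ent; simp [pvAInner]
  | cons x xs ih =>
    intro ent
    simp only [pvAInner]
    split
    · split
      · simp
      · split <;> simp_all <;> omega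
    · exact le_trans (ih _) (by simp)

-- A's outer `while i<N` loop
def pvAOuter (S C : List Int) (e : Int) : List Int → List (List Int)
  | [] => []
  | x :: xs =>
    if x ∈ S then
      let p := pvAInner C e xs [x]
      p.1 :: pvAOuter S C e p.2
    else pvAOuter S C e xs
termination_by l => l.length
decreasing_by
  · exact Nat.lt_succ_of_le (pvAInner_len C e xs [x])
  · simp

def get_targ_ents_3 (pos_list : List Int) (rotate_pos_cls : List (List Int)) (ent_end_pos : Int) : List (List Int) :=
  -- rotate_pos_cls[0] / rotate_pos_cls[1]; Pre_ guarantees both indices are in range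
  let S := (PySem.List.pyGet? rotate_pos_cls 0).getD []
  let C := (PySem.List.pyGet? rotate_pos_cls 1).getD []
  pvAOuter S C ent_end_pos pos_list

-- ===== PORT B =====
-- B's loop body: state = (finished entities, current entity or none, expecting-class flag)
def pvBStep (S C : List Int) (e : Int)
    (st : List (List Int) × Option (List Int) × Bool) (t : Int) :
    List (List Int) × Option (List Int) × Bool :=
  match st with
  | (ents, none, _) => if t ∈ S then (ents, some [t], false) else (ents, none, false)
  | (ents, some ent, false) => (ents, some (ent ++ [t]), t == e)
  | (ents, some ent, true) =>
      if t ∈ C then (ents ++ [ent ++ [t]], none, false)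
      else if t ∈ S then (ents ++ [ent], some [t], false)
      else (ents ++ [ent], none, false)

def get_targ_ents_3_alt (pos_list : List Int) (rotate_pos_cls : List (List Int)) (ent_end_pos : Int) : List (List Int) :=
  let S := (PySem.List.pyGet? rotate_pos_cls 0).getD []
  let C := (PySem.List.pyGet? rotate_pos_cls 1).getD []
  let r := pos_list.foldl (pvBStep S C ent_end_pos) ([], none, false)
  r.1 ++ (match r.2.1 with | some ent => [ent] | none => [])

-- ===== PRECONDITION & SPEC =====
-- Pre_ excludes rotate_pos_cls with fewer than two entries: there A raises IndexError on
-- most inputs (and returns only when the missing index is never reached), while B always raises.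
def Pre_get_targ_ents_3 (pos_list : List Int) (rotate_pos_cls : List (List Int)) (ent_end_pos : Int) : Prop :=
  2 ≤ rotate_pos_cls.length
instance (pos_list : List Int) (rotate_pos_cls : List (List Int)) (ent_end_pos : Int) : Decidable (Pre_get_targ_ents_3 pos_list rotate_pos_cls ent_end_pos) := by unfold Pre_get_targ_ents_3; infer_instance

def pvWitness_get_targ_ents_3 : List Int × List (List Int) × Int := ([1, 5, 2, 3, 7, 1, 2], [[1], [3]], 2)

def Spec_get_targ_ents_3 (pos_list : List Int) (rotate_pos_cls : List (List Int)) (ent_end_pos : Int) (out : List (List Int)) : Prop := out = get_targ_ents_3_alt pos_list rotate_pos_cls ent_end_pos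
instance (pos_list : List Int) (rotate_pos_cls : List (List Int)) (ent_end_pos : Int) (out : List (List Int)) : Decidable (Spec_get_targ_ents_3 pos_list rotate_pos_cls ent_end_pos out) := by unfold Spec_get_targ_ents_3; infer_instance

-- ===== CLAIM (what is proved, stated in full; the proofs are below) =====
def Claim_equal_get_targ_ents_3 : Prop := ∀ (pos_list : List Int) (rotate_pos_cls : List (List Int)) (ent_end_pos : Int), Dom_get_targ_ents_3 pos_list rotate_pos_cls ent_end_pos → Pre_get_targ_ents_3 pos_list rotate_pos_cls ent_end_pos → Spec_get_targ_ents_3 pos_list rotate_pos_cls ent_end_pos (get_targ_ents_3 pos_list rotate_pos_cls ent_end_pos)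

-- ===== LEMMAS AND PROOFS =====

-- finalize B's fold state
def pvFin (st : List (List Int) × Option (List Int) × Bool) : List (List Int) :=
  st.1 ++ (match st.2.1 with | some ent => [ent] | none => [])

-- what the fold computes from the EXPECT-CLS state, phrased via A's functions
def pvExpRHS (S C : List Int) (e : Int) (l ent : List Int) : List (List Int) :=
  match l with
  | [] => [ent]
  | y :: ys => if y ∈ C then (ent ++ [y]) :: pvAOuter S C e ys else ent :: pvAOuter S C e (y :: ys)

theorem pvKey (S C : List Int) (e : Int) : ∀ (l : List Int),
    (∀ ents, pvFin (l.foldl (pvBStep S C e) (ents, none, false)) = ents ++ pvAOuter S C e l) ∧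
    (∀ ents ent, pvFin (l.foldl (pvBStep S C e) (ents, some ent, false)) =
      ents ++ ((pvAInner C e l ent).1 :: pvAOuter S C e (pvAInner C e l ent).2)) ∧
    (∀ ents ent, pvFin (l.foldl (pvBStep S C e) (ents, some ent, true)) =
      ents ++ pvExpRHS S C e l ent) := by
  intro l
  induction l with
  | nil =>
    refine ⟨fun ents => ?_, fun ents ent => ?_, fun ents ent => ?_⟩ <;>
      simp [pvFin, pvAOuter, pvAInner, pvExpRHS]
  | cons x xs ih =>
    obtain ⟨ihOut, ihIn, ihExp⟩ := ih
    refine ⟨fun ents => ?_, fun ents ent => ?_, fun ents ent => ?_⟩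
    · -- OUTSIDE
      by_cases hS : x ∈ S
      · simp only [List.foldl_cons, pvBStep, if_pos hS, ihIn]
        simp [pvAOuter, hS]
      · simp only [List.foldl_cons, pvBStep, if_neg hS, ihOut]
        simp only [pvAOuter, if_neg hS]
    · -- INSIDE
      by_cases he : x = e
      · subst he
        simp only [List.foldl_cons, pvBStep, beq_self_eq_true, ihExp]
        cases xs with
        | nil => simp [pvAInner, pvExpRHS, pvAOuter]
        | cons y ys => by_cases hC : y ∈ C <;> simp [pvAInner, pvExpRHS, hC]
      · have hbe : (x == e) = false := beq_false_of_ne he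
        simp only [List.foldl_cons, pvBStep, hbe, ihIn]
        simp [pvAInner, he]
    · -- EXPECT-CLS
      by_cases hC : x ∈ C
      · simp only [List.foldl_cons, pvBStep, if_pos hC, ihOut]
        simp [pvExpRHS, hC]
      · by_cases hS : x ∈ S
        · simp only [List.foldl_cons, pvBStep, if_neg hC, if_pos hS, ihIn]
          simp [pvExpRHS, hC, pvAOuter, hS]
        · simp only [List.foldl_cons, pvBStep, if_neg hC, if_neg hS, ihOut]
          simp [pvExpRHS, hC, pvAOuter, hS]

-- ===== VERDICT (by name: the statement is the Claim_ definition above) =====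
theorem get_targ_ents_3_spec : Claim_equal_get_targ_ents_3 := by
  intro pos_list rotate_pos_cls ent_end_pos _ _
  unfold Spec_get_targ_ents_3 get_targ_ents_3 get_targ_ents_3_alt
  exact ((pvKey _ _ ent_end_pos pos_list).1 []).symm
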